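-- pv_equiv track=rewrite | github.com/restrictor/projecteuler | puzzels/043.py | concat_divisibles
-- ===== SOURCE A (Python) =====
-- def concat_divisibles(front: list, back: list) -> list:
--     solution = []
--     for back_digits in back:
--         for front_digits in front:
--             if front_digits[1:] == back_digits[0:2]:
--                 if front_digits[0] not in back_digits:
--                     solution.append(front_digits[0] + back_digits)
--     return solution
-- ===== SOURCE B (Python) =====
-- def concat_divisibles(front: list, back: list) -> list:
--     groups = {}
--     for f in front:
--         k = f[1:]
--         groups[k] = groups.get(k, []) + [f]
--     solution = []
--     for b in back:
--         for f in groups.get(b[0:2], []):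
--             if f[0] not in b:
--                 solution.append(f[0] + b)
--     return solution
-- ===== Notes on version B (the rewrite author's own statement) =====
-- stated objective: faster
-- what changed: Builds a dict once grouping front strings by their tail f[1:], then for each back string looks up the group for b[0:2], removing the inner scan of front per back element.
import Mathlib
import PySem

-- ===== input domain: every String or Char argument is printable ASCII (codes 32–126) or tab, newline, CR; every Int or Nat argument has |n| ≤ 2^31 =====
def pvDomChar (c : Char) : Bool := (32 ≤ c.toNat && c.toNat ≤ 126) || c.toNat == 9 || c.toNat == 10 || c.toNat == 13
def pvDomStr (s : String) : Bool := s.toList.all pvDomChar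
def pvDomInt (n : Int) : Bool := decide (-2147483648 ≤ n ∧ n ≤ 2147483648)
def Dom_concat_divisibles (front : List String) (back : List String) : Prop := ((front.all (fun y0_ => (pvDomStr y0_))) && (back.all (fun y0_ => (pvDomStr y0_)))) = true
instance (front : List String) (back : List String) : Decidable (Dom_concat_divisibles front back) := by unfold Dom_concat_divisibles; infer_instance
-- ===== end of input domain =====

-- B replaces A's inner scan of `front` for every `back` element by a dict built once,
-- grouping `front` strings by their tail `f[1:]` and looking up `b[0:2]` (objective: faster, asymptotic).

-- ===== PORT A =====
def concat_divisibles (front : List String) (back : List String) : List String :=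
  back.foldl (fun solution back_digits =>
    front.foldl (fun solution front_digits =>
      if PySem.List.slice front_digits.toList (some 1) none
          == PySem.List.slice back_digits.toList (some 0) (some 2) then
        -- front_digits[0]: in range under Pre_ (a matching front string is nonempty unless "" ∈ front and "" ∈ back)
        if PySem.Chars.isIn [PySem.List.pyGetD front_digits.toList 0 ' '] back_digits.toList then
          solution
        else
          solution ++ [String.ofList (PySem.List.pyGetD front_digits.toList 0 ' ' :: back_digits.toList)]
      else solution) solution) []

-- ===== PORT B =====
-- groups[f[1:]] = groups.get(f[1:], []) + [f]
def cdGroups (front : List String) : PySem.Dict (List Char) (List String) :=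
  front.foldl (fun d f => d.modify (PySem.List.slice f.toList (some 1) none) [] (· ++ [f]))
    PySem.Dict.empty

def concat_divisibles_alt (front : List String) (back : List String) : List String :=
  let groups := cdGroups front
  back.foldl (fun solution b =>
    (groups.getD (PySem.List.slice b.toList (some 0) (some 2)) []).foldl (fun solution f =>
      if PySem.Chars.isIn [PySem.List.pyGetD f.toList 0 ' '] b.toList then
        solution
      else
        solution ++ [String.ofList (PySem.List.pyGetD f.toList 0 ' ' :: b.toList)]) solution) []

-- ===== PRECONDITION & SPEC =====
-- Pre_ excludes exactly the inputs where A raises IndexError (front_digits[0] on the empty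
-- front string, reached iff "" ∈ front and "" ∈ back); B raises there too.
def Pre_concat_divisibles (front : List String) (back : List String) : Prop :=
  ¬ ("" ∈ front ∧ "" ∈ back)
instance (front : List String) (back : List String) : Decidable (Pre_concat_divisibles front back) := by unfold Pre_concat_divisibles; infer_instance

def pvWitness_concat_divisibles : List String × List String :=
  (["123", "307"], ["0753", "231"])

def Spec_concat_divisibles (front : List String) (back : List String) (out : List String) : Prop := out = concat_divisibles_alt front back
instance (front : List String) (back : List String) (out : List String) : Decidable (Spec_concat_divisibles front back out) := by unfold Spec_concat_divisibles; infer_instance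

-- ===== CLAIM (what is proved, stated in full; the proofs are below) =====
def Claim_equal_concat_divisibles : Prop := ∀ (front : List String) (back : List String), Dom_concat_divisibles front back → Pre_concat_divisibles front back → Spec_concat_divisibles front back (concat_divisibles front back)

-- ===== LEMMAS AND PROOFS =====

-- The group stored at key c is exactly the front strings whose tail is c, in order.
theorem cdGroups_getD (front : List String) (c : List Char) :
    (cdGroups front).getD c [] =
      front.filter (fun f => PySem.List.slice f.toList (some 1) none == c) := by
  have h : cdGroups front =
      (front.map (fun f => (PySem.List.slice f.toList (some 1) none, f))).foldl
        (fun d p => d.modify p.1 [] (· ++ [p.2])) PySem.Dict.empty := by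
    simp only [List.foldl_map]
    rfl
  rw [h, PySem.Dict.getD_foldl_modify_append, List.filter_map]
  simp [Function.comp_def]

theorem concat_divisibles_spec : Claim_equal_concat_divisibles := by
  intro front back _ _
  unfold Spec_concat_divisibles concat_divisibles concat_divisibles_alt
  apply List.foldl_ext
  intro sol b _
  rw [cdGroups_getD, List.foldl_filter]
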